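-- pv_equiv track=rewrite | github.com/11844/Python_Projects | Suspense String.py | suspense_string
-- ===== SOURCE A (Python) =====
-- from collections import deque
--
-- def suspense_string(s):
--     S = deque(s)
--     T = deque()
--     alice_turn = True
--
--     while S:
--         if alice_turn:
--             c = S.popleft()
--             if not T or c < T[0]:
--                 T.appendleft(c)
--             else:
--                 T.append(c)
--         else:
--             c = S.pop()
--             if not T or c > T[0]:
--                 T.appendleft(c)
--             else:
--                 T.append(c)
--         alice_turn = not alice_turn
--
--     return "".join(T)
-- ===== SOURCE B (Python) =====
-- from collections import deque
--
-- def suspense_string(s):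
--     # processing order: s[0], s[-1], s[1], s[-2], ... = interleave of s and reversed(s), first len(s) chars
--     order = [c for pair in zip(s, reversed(s)) for c in pair][:len(s)]
--     T = deque()
--     for i, c in enumerate(order):
--         if i % 2 == 0:
--             if not T or c < T[0]:
--                 T.appendleft(c)
--             else:
--                 T.append(c)
--         else:
--             if not T or c > T[0]:
--                 T.appendleft(c)
--             else:
--                 T.append(c)
--     return "".join(T)
-- ===== Notes on version B (the rewrite author's own statement) =====
-- stated objective: alternative
-- what changed: A consumes a mutable deque destructively in one read-and-build while-loop; B first materialises the consumption order as the length-truncated interleaving of s with reversed(s) (zip comprehension), then builds T in a separate enumerate fold branching on index parity.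
import Mathlib
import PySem

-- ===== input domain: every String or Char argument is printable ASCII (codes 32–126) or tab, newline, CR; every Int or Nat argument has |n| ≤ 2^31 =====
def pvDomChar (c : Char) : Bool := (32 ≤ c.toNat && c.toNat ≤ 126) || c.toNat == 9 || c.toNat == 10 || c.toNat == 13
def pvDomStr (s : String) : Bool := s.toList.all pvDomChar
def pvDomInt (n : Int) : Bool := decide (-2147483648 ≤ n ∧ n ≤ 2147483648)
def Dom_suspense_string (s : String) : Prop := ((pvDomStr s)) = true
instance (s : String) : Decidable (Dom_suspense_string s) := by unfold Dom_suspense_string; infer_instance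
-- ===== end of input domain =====

-- B replaces A's destructive two-ended while-loop over a deque by first materialising the
-- consumption order (interleave of s and reversed s, truncated) and then folding over it
-- with enumerate, branching on index parity (objective: alternative decomposition).

-- ===== PORT A =====
-- literal port of A's while-loop: state (S, T, alice_turn); deque → List Char,
-- popleft → head, pop → getLast/dropLast, appendleft → cons, append → ++ [c]
def suspense_string_loop (S T : List Char) (alice : Bool) : List Char :=
  match S with
  | [] => T
  | c :: rest =>
    if alice then
      let T' := match T with
        | [] => [c]
        | h0 :: _ => if c < h0 then c :: T else T ++ [c]
      suspense_string_loop rest T' false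
    else
      let c' := (c :: rest).getLast (by simp)
      let S' := (c :: rest).dropLast
      let T' := match T with
        | [] => [c']
        | h0 :: _ => if c' > h0 then c' :: T else T ++ [c']
      suspense_string_loop S' T' true
termination_by S.length
decreasing_by
  · simp
  · simp [List.length_dropLast]

def suspense_string (s : String) : String :=
  String.ofList (suspense_string_loop s.toList [] true)

-- ===== PORT B =====
def suspense_string_alt (s : String) : String :=
  let l := s.toList
  let order := ((l.zip l.reverse).flatMap (fun p => [p.1, p.2])).take l.length
  let T := (order.zipIdx).foldl
    (fun T ci =>
      if ci.2 % 2 == 0 then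
        match T with
        | [] => [ci.1]
        | h0 :: _ => if ci.1 < h0 then ci.1 :: T else T ++ [ci.1]
      else
        match T with
        | [] => [ci.1]
        | h0 :: _ => if ci.1 > h0 then ci.1 :: T else T ++ [ci.1]) []
  String.ofList T

-- ===== PRECONDITION & SPEC =====
def Spec_suspense_string (s : String) (out : String) : Prop := out = suspense_string_alt s
instance (s : String) (out : String) : Decidable (Spec_suspense_string s out) := by unfold Spec_suspense_string; infer_instance

-- ===== CLAIM (what is proved, stated in full; the proofs are below) =====
def Claim_equal_suspense_string : Prop := ∀ (s : String), Dom_suspense_string s → Spec_suspense_string s (suspense_string s)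

-- ===== LEMMAS AND PROOFS =====

-- the T-update both programs perform, parameterised by whose turn it is
def pvStep (b : Bool) (T : List Char) (c : Char) : List Char :=
  if b then
    match T with
    | [] => [c]
    | h0 :: _ => if c < h0 then c :: T else T ++ [c]
  else
    match T with
    | [] => [c]
    | h0 :: _ => if c > h0 then c :: T else T ++ [c]

-- folding a (pre-materialised) consumption order with an alternating turn flag
def pvFoldTurn : List Char → List Char → Bool → List Char
  | [], T, _ => T
  | c :: l, T, b => pvFoldTurn l (pvStep b T c) (!b)

-- the order in which A consumes characters
def pvOrd (S : List Char) (b : Bool) : List Char :=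
  match S with
  | [] => []
  | c :: rest =>
    if b then c :: pvOrd rest false
    else (c :: rest).getLast (by simp) :: pvOrd (c :: rest).dropLast true
termination_by S.length
decreasing_by
  · simp
  · simp [List.length_dropLast]

def pvInter (x y : List Char) : List Char := (x.zip y).flatMap (fun p => [p.1, p.2])

-- A's loop = fold of the consumption order
theorem pv_loop_eq_fold : ∀ n (S T : List Char) (b : Bool), S.length ≤ n →
    suspense_string_loop S T b = pvFoldTurn (pvOrd S b) T b := by
  intro n
  induction n with
  | zero =>
    intro S T b h
    have : S = [] := List.eq_nil_of_length_eq_zero (Nat.le_zero.mp h)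
    subst this
    simp [suspense_string_loop, pvOrd, pvFoldTurn]
  | succ n ih =>
    intro S T b h
    match S with
    | [] => simp [suspense_string_loop, pvOrd, pvFoldTurn]
    | c :: rest =>
      cases b with
      | true =>
        rw [suspense_string_loop.eq_def, pvOrd.eq_def]
        simp only [reduceIte]
        rw [pvFoldTurn]
        rw [ih rest _ false (by simpa using Nat.le_of_succ_le_succ h)]
        rfl
      | false =>
        rw [suspense_string_loop.eq_def, pvOrd.eq_def]
        simp only [Bool.false_eq_true, reduceIte]
        rw [pvFoldTurn]
        rw [ih (c :: rest).dropLast _ true (by simp at h ⊢; omega)]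
        rfl

-- the consumption order starting with Alice = interleave of l and l.reverse truncated to length
theorem pv_ord_eq_inter : ∀ n (l : List Char), l.length ≤ n →
    pvOrd l true = (pvInter l l.reverse).take l.length := by
  intro n
  induction n using Nat.strong_induction_on with
  | _ n ih =>
    intro l hl
    match l with
    | [] => simp [pvOrd, pvInter]
    | [a] => simp [pvOrd, pvInter, List.zip]
    | a :: b :: t =>
      -- peel both ends: l = a :: m ++ [lst]
      have hne : (b :: t) ≠ [] := by simp
      set m := (b :: t).dropLast with hm
      set lst := (b :: t).getLast hne with hlst
      have hsplit : b :: t = m ++ [lst] := (List.dropLast_append_getLast hne).symm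
      have hmlen : m.length = t.length := by simp [hm]
      have hn : 2 ≤ n := by simp at hl; omega
      -- left side
      have hL : pvOrd (a :: b :: t) true = a :: lst :: pvOrd m true := by
        rw [pvOrd.eq_def]; simp only [reduceIte]
        rw [pvOrd.eq_def]; simp only [Bool.false_eq_true, reduceIte]
        rfl
      have hIH : pvOrd m true = (pvInter m m.reverse).take m.length := by
        refine ih (n - 1) (by omega) m (by simp at hl; omega)
      -- right side
      have hrev : (a :: (b :: t)).reverse = lst :: m.reverse ++ [a] := by
        conv_lhs => rw [show a :: (b :: t) = a :: (m ++ [lst]) by rw [← hsplit]]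
        simp
      have hzip : (a :: (b :: t)).zip ((a :: (b :: t)).reverse)
          = (a, lst) :: (m.zip m.reverse ++ [(lst, a)]) := by
        rw [hrev]
        conv_lhs => rw [show a :: (b :: t) = a :: (m ++ [lst]) by rw [← hsplit]]
        show (a :: m ++ [lst]).zip (lst :: m.reverse ++ [a]) = _
        rw [show (a :: m ++ [lst]) = (a :: m) ++ [lst] by simp,
            show (lst :: m.reverse ++ [a]) = (lst :: m.reverse) ++ [a] by simp,
            List.zip_append (by simp)]
        simp [List.zip]
      have hlen2 : (List.flatMap (fun p : Char × Char => [p.1, p.2]) (m.zip m.reverse)).length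
          = 2 * m.length := by
        simp [List.length_flatMap, List.length_zip]
        omega
      rw [hL, hIH]
      simp only [pvInter]
      rw [hzip]
      simp only [List.flatMap_cons, List.flatMap_append, List.flatMap_nil,
        List.cons_append, List.nil_append, List.append_nil]
      rw [show (a :: b :: t).length = m.length + 2 by simp [hmlen]]
      rw [List.take_succ_cons, List.take_succ_cons]
      rw [List.take_append_of_le_length (by omega)]

-- fold over zipIdx with index parity = fold with alternating turn flag
theorem pv_zipIdx_fold : ∀ (l : List Char) (T : List Char) (k : Nat),
    (l.zipIdx k).foldl
      (fun T ci =>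
        if ci.2 % 2 == 0 then
          match T with
          | [] => [ci.1]
          | h0 :: _ => if ci.1 < h0 then ci.1 :: T else T ++ [ci.1]
        else
          match T with
          | [] => [ci.1]
          | h0 :: _ => if ci.1 > h0 then ci.1 :: T else T ++ [ci.1]) T
    = pvFoldTurn l T (k % 2 == 0) := by
  intro l
  induction l with
  | nil => intro T k; simp [pvFoldTurn]
  | cons c rest ih =>
    intro T k
    rw [List.zipIdx_cons, List.foldl_cons, pvFoldTurn, ih]
    have hpar : ((k + 1) % 2 == 0) = !(k % 2 == 0) := by
      rcases Nat.mod_two_eq_zero_or_one k with h | h <;> simp [Nat.add_mod, h]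
    rw [hpar]
    rfl

-- ===== VERDICT (by name: the statement is the Claim_ definition above) =====
theorem suspense_string_spec : Claim_equal_suspense_string := by
  intro s _
  show suspense_string s = suspense_string_alt s
  unfold suspense_string suspense_string_alt
  dsimp only
  rw [pv_loop_eq_fold s.toList.length _ _ _ le_rfl,
      pv_ord_eq_inter s.toList.length _ le_rfl,
      pv_zipIdx_fold]
  rfl
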